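-- pv_equiv track=rewrite | github.com/AndrewKozyrev/PYTHON | Enigma_Machine.py | rotor1
-- ===== SOURCE A (Python) =====
-- def rotor1(num=0):
--     l_port = [1, 2, 3, 4]
--
--     while num > 0:
--         ##### rotating a rotor
--         temp = l_port.pop(0)
--         l_port.append(temp)
--         #####
--         num -= 1
--
--     l = {'A': l_port[0], 'B': l_port[1], 'C': l_port[2], 'D': l_port[3]}     ## mapping letter --> port
--     r = ['A', 'B', 'C', 'D']      ## right port
--
--     ##### mapping left port ---> right port
--     d = {1: l_port.index(1), 2: (l_port.index(2) + 2) % 4, 3: l_port.index(3) - 1, 4: l_port.index(4) - 1}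
--     #####
--
--     rotor = {'A': r[d[l['A']]], 'B': r[d[l['B']]], 'C': r[d[l['C']]], 'D': r[d[l['D']]]}
--     return rotor
-- ===== SOURCE B (Python) =====
-- def rotor1(num=0):
--     # The rotor has period 4: reduce the rotation count to num % 4 (0 for num <= 0)
--     # and read the mapping off a precomputed table.
--     TABLES = (
--         {'A': 'A', 'B': 'D', 'C': 'B', 'D': 'C'},
--         {'A': 'C', 'B': 'A', 'C': 'B', 'D': 'D'},
--         {'A': 'D', 'B': 'A', 'C': 'C', 'D': 'B'},
--         {'A': 'D', 'B': 'B', 'C': 'A', 'D': 'C'},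
--     )
--     return dict(TABLES[num % 4 if num > 0 else 0])
-- ===== Notes on version B (the rewrite author's own statement) =====
-- stated objective: faster
-- what changed: B replaces the O(num) rotation loop and index arithmetic by a 4-entry lookup table indexed by num % 4 (0 for num <= 0), using the rotor's periodicity.
import Mathlib
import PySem

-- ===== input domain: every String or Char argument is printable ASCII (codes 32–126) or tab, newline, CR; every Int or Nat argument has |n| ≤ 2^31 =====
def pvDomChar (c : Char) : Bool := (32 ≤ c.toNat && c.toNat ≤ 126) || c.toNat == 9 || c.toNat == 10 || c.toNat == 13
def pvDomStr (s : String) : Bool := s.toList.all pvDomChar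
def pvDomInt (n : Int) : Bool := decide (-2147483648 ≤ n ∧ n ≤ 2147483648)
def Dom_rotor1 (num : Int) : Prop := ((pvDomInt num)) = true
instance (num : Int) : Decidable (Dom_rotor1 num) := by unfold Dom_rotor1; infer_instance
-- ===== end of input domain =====

-- B replaces the O(num) rotation loop by a 4-entry table indexed by num % 4 (0 for num ≤ 0), using the rotor's periodicity.

-- ===== PORT A =====
-- while num > 0: pop(0) + append rotates l_port left once; num -= 1
def rotor1Loop (l : List Int) (num : Int) : List Int :=
  if _h : num > 0 then rotor1Loop (l.drop 1 ++ l.take 1) (num - 1) else l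
termination_by num.toNat
decreasing_by omega

def rotor1 (num : Int) : List (String × String) :=
  let l_port := rotor1Loop [1, 2, 3, 4] num
  -- l_port[i]: indices always in range (l_port is a permutation of [1,2,3,4]), so getD 0 is exact
  let l : PySem.Dict String Int := PySem.Dict.ofList
    [("A", (PySem.List.pyGet? l_port 0).getD 0), ("B", (PySem.List.pyGet? l_port 1).getD 0),
     ("C", (PySem.List.pyGet? l_port 2).getD 0), ("D", (PySem.List.pyGet? l_port 3).getD 0)]
  let r : List String := ["A", "B", "C", "D"]
  -- l_port.index(k): k is always present, so getD 0 is exact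
  let d : PySem.Dict Int Int := PySem.Dict.ofList
    [(1, (((PySem.List.index? l_port 1).getD 0 : Nat) : Int)),
     (2, PySem.Int.mod ((((PySem.List.index? l_port 2).getD 0 : Nat) : Int) + 2) 4),
     (3, (((PySem.List.index? l_port 3).getD 0 : Nat) : Int) - 1),
     (4, (((PySem.List.index? l_port 4).getD 0 : Nat) : Int) - 1)]
  -- r[d[l[c]]]: index may be negative (r[-1]); Python wraparound via pyGet?; always in range
  let look (c : String) : String :=
    (PySem.List.pyGet? r ((PySem.Dict.get? d ((PySem.Dict.get? l c).getD 0)).getD 0)).getD ""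
  [("A", look "A"), ("B", look "B"), ("C", look "C"), ("D", look "D")]

-- ===== PORT B =====
def rotor1_alt (num : Int) : List (String × String) :=
  let tables : List (List (String × String)) :=
    [[("A","A"),("B","D"),("C","B"),("D","C")],
     [("A","C"),("B","A"),("C","B"),("D","D")],
     [("A","D"),("B","A"),("C","C"),("D","B")],
     [("A","D"),("B","B"),("C","A"),("D","C")]]
  -- TABLES[num % 4 if num > 0 else 0]: the index is always in range, so getD [] is exact
  (PySem.List.pyGet? tables (if num > 0 then PySem.Int.mod num 4 else 0)).getD []

-- ===== PRECONDITION & SPEC =====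
def Spec_rotor1 (num : Int) (out : List (String × String)) : Prop := out = rotor1_alt num
instance (num : Int) (out : List (String × String)) : Decidable (Spec_rotor1 num out) := by unfold Spec_rotor1; infer_instance

-- ===== CLAIM (what is proved, stated in full; the proofs are below) =====
def Claim_equal_rotor1 : Prop := ∀ (num : Int), Dom_rotor1 num → Spec_rotor1 num (rotor1 num)

-- ===== LEMMAS AND PROOFS =====

lemma rotor1Loop_nonpos (l : List Int) (num : Int) (h : ¬ num > 0) :
    rotor1Loop l num = l := by
  rw [rotor1Loop]; simp [h]

lemma rotor1Loop_pos (l : List Int) (num : Int) (h : num > 0) :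
    rotor1Loop l num = rotor1Loop (l.drop 1 ++ l.take 1) (num - 1) := by
  rw [rotor1Loop]; simp [h]

lemma rotor1Loop_zero (l : List Int) : rotor1Loop l 0 = l :=
  rotor1Loop_nonpos l 0 (by norm_num)

lemma rl1 : rotor1Loop [1, 2, 3, 4] 1 = [2, 3, 4, 1] := by
  rw [rotor1Loop_pos _ _ (by norm_num)]; norm_num [rotor1Loop_zero]

lemma rl2 : rotor1Loop [1, 2, 3, 4] 2 = [3, 4, 1, 2] := by
  rw [rotor1Loop_pos _ _ (by norm_num), rotor1Loop_pos _ _ (by norm_num)]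
  norm_num [rotor1Loop_zero]

lemma rl3 : rotor1Loop [1, 2, 3, 4] 3 = [4, 1, 2, 3] := by
  rw [rotor1Loop_pos _ _ (by norm_num), rotor1Loop_pos _ _ (by norm_num),
      rotor1Loop_pos _ _ (by norm_num)]
  norm_num [rotor1Loop_zero]

lemma rotor1Loop_add4 (n : Int) (hn : 0 ≤ n) :
    rotor1Loop [1, 2, 3, 4] (n + 4) = rotor1Loop [1, 2, 3, 4] n := by
  rw [rotor1Loop_pos _ _ (by omega), rotor1Loop_pos _ _ (by omega),
      rotor1Loop_pos _ _ (by omega), rotor1Loop_pos _ _ (by omega)]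
  norm_num
  congr 1
  omega

lemma rotor1Loop_mod (n : Nat) :
    rotor1Loop [1, 2, 3, 4] (n : Int) = rotor1Loop [1, 2, 3, 4] ((n % 4 : Nat) : Int) := by
  induction n using Nat.strong_induction_on with
  | _ n ih =>
    by_cases h : n < 4
    · rw [Nat.mod_eq_of_lt h]
    · have h4 : n = (n - 4) + 4 := by omega
      rw [h4]
      have hc : ((↑(n - 4 + 4) : Int)) = ((n - 4 : Nat) : Int) + 4 := by push_cast; ring
      rw [hc, rotor1Loop_add4 _ (by positivity), ih (n - 4) (by omega)]
      congr 1
      omega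

theorem rotor1_spec : Claim_equal_rotor1 := by
  intro num _
  unfold Spec_rotor1
  by_cases h : num > 0
  · have hmod : PySem.Int.mod num 4 = ((num.toNat % 4 : Nat) : Int) := by
      rw [PySem.Int.mod_eq_emod_of_pos (by norm_num : (0:Int) < 4)]
      omega
    have hloop : rotor1Loop [1, 2, 3, 4] num
        = rotor1Loop [1, 2, 3, 4] ((num.toNat % 4 : Nat) : Int) := by
      conv_lhs => rw [show num = ((num.toNat : Nat) : Int) by omega]
      exact rotor1Loop_mod _
    have hm : num.toNat % 4 = 0 ∨ num.toNat % 4 = 1 ∨ num.toNat % 4 = 2 ∨ num.toNat % 4 = 3 := by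
      omega
    simp only [rotor1, rotor1_alt, hloop, hmod, if_pos h]
    rcases hm with hm | hm | hm | hm <;> rw [hm] <;> push_cast <;>
      simp only [rotor1Loop_zero, rl1, rl2, rl3] <;> rfl
  · simp only [rotor1, rotor1_alt, rotor1Loop_nonpos _ _ h, if_neg h]
    rfl
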